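-- pv_equiv track=rewrite | github.com/pranathi-0/secret_msg | new.py | getReverseletter
-- ===== SOURCE A (Python) =====
-- def getReverseletter(letter):
--     alpha="abcdefghijklmnopqrstuvwxyz"
--     reversealpha=alpha[::-1]
--     for i in range(0,len(alpha)):
--         if letter.lower() and letter==alpha[i]:
--             return reversealpha[i]
--         if letter.upper() and letter==alpha[i].upper():
--             return reversealpha[i].lower()
--     return letter
-- ===== SOURCE B (Python) =====
-- def getReverseletter(letter):
--     # Closed-form reverse-alphabet mapping; uppercase input intentionally maps to
--     # the lowercase reversed letter (same as A), anything else passes through.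
--     if len(letter) == 1:
--         if 'a' <= letter <= 'z':
--             return chr(ord('z') - (ord(letter) - ord('a')))
--         if 'A' <= letter <= 'Z':
--             return chr(ord('z') - (ord(letter) - ord('A')))
--     return letter
-- ===== Notes on version B (the rewrite author's own statement) =====
-- stated objective: faster
-- what changed: Replaced the 26-iteration scan over the alphabet string and its reversed slice with a closed-form chr/ord arithmetic computation (keeping A's quirk that uppercase input yields the lowercase reversed letter).
import Mathlib
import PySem

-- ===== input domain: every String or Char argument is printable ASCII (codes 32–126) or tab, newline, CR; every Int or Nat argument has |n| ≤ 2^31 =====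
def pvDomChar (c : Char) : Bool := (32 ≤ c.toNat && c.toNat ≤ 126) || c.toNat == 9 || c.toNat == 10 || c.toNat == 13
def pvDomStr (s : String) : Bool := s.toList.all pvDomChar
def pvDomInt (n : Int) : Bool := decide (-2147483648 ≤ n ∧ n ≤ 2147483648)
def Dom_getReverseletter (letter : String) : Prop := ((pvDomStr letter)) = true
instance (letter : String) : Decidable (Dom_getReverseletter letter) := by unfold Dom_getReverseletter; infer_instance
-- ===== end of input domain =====

-- B replaces A's 26-step scan over the alphabet and its reversed slice with closed-form
-- chr/ord arithmetic (idiomatic; keeps A's lowercase output for uppercase input).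

-- ===== PORT A =====
-- the for-loop over range(0, len(alpha)); returns on the first matching index
def pvLoopA (letter : String) (alpha reversealpha : List Char) : List Int → String
  | [] => letter
  | i :: rest =>
    match PySem.List.pyGet? alpha i, PySem.List.pyGet? reversealpha i with
    | some ai, some ri =>
      if PySem.Str.lower letter ≠ "" ∧ letter = String.ofList [ai] then
        String.ofList [ri]
      else if PySem.Str.upper letter ≠ "" ∧ letter = String.ofList [PySem.Chars.upperChar ai] then
        String.ofList [PySem.Chars.lowerChar ri]
      else pvLoopA letter alpha reversealpha rest
    | _, _ => letter  -- IndexError: unreachable, i always in range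

def getReverseletter (letter : String) : String :=
  let alpha : List Char := "abcdefghijklmnopqrstuvwxyz".toList
  let reversealpha : List Char := (PySem.List.slice? alpha none none (-1)).getD []
  pvLoopA letter alpha reversealpha (PySem.List.pyRange 0 (PySem.Chars.len alpha) 1)

-- ===== PORT B =====
def getReverseletter_alt (letter : String) : String :=
  match letter.toList with
  | [c] =>
    if 'a' ≤ c ∧ c ≤ 'z' then String.ofList [Char.ofNat ('z'.toNat - (c.toNat - 'a'.toNat))]
    else if 'A' ≤ c ∧ c ≤ 'Z' then String.ofList [Char.ofNat ('z'.toNat - (c.toNat - 'A'.toNat))]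
    else letter
  | _ => letter

-- ===== PRECONDITION & SPEC =====
def Spec_getReverseletter (letter : String) (out : String) : Prop := out = getReverseletter_alt letter
instance (letter : String) (out : String) : Decidable (Spec_getReverseletter letter out) := by unfold Spec_getReverseletter; infer_instance

-- ===== CLAIM (what is proved, stated in full; the proofs are below) =====
def Claim_equal_getReverseletter : Prop := ∀ (letter : String), Dom_getReverseletter letter → Spec_getReverseletter letter (getReverseletter letter)

-- ===== LEMMAS AND PROOFS =====

-- a string whose character list has length ≠ 1 never equals a one-character literal,
-- so every test in A's loop is false and the loop falls through to `letter`
theorem pvLoopA_of_len_ne_one (letter : String) (h : letter.toList.length ≠ 1)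
    (alpha reversealpha : List Char) (is : List Int) :
    pvLoopA letter alpha reversealpha is = letter := by
  induction is with
  | nil => rfl
  | cons i rest ih =>
    unfold pvLoopA
    cases PySem.List.pyGet? alpha i with
    | none => cases PySem.List.pyGet? reversealpha i <;> rfl
    | some ai =>
      cases PySem.List.pyGet? reversealpha i with
      | none => rfl
      | some ri =>
        have h1 : letter ≠ String.ofList [ai] := by
          intro he; apply h; rw [he]; simp
        have h2 : letter ≠ String.ofList [PySem.Chars.upperChar ai] := by
          intro he; apply h; rw [he]; simp
        have H1 : ¬(PySem.Str.lower letter ≠ "" ∧ letter = String.ofList [ai]) :=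
          fun hc => h1 hc.2
        have H2 : ¬(PySem.Str.upper letter ≠ "" ∧ letter = String.ofList [PySem.Chars.upperChar ai]) :=
          fun hc => h2 hc.2
        dsimp only
        rw [if_neg H1, if_neg H2]
        exact ih

theorem pv_key (n : Nat) (h : (32 ≤ n ∧ n ≤ 126) ∨ n = 9 ∨ n = 10 ∨ n = 13) :
    getReverseletter (String.ofList [Char.ofNat n]) = getReverseletter_alt (String.ofList [Char.ofNat n]) := by
  rcases h with ⟨h1, h2⟩ | h | h | h
  · interval_cases n <;> decide
  all_goals subst h; decide

theorem pv_single (c : Char) (h : pvDomChar c = true) :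
    getReverseletter (String.ofList [c]) = getReverseletter_alt (String.ofList [c]) := by
  simp only [pvDomChar, Bool.or_eq_true, Bool.and_eq_true, decide_eq_true_eq, beq_iff_eq] at h
  have := pv_key c.toNat (by tauto)
  rwa [Char.ofNat_toNat] at this

-- ===== VERDICT (by name: the statement is the Claim_ definition above) =====
theorem getReverseletter_spec : Claim_equal_getReverseletter := by
  intro letter hdom
  unfold Spec_getReverseletter
  match hl : letter.toList with
  | [c] =>
    have hletter : letter = String.ofList [c] := by
      apply String.toList_injective; simp [hl]
    have hc : pvDomChar c = true := by
      have := hdom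
      unfold Dom_getReverseletter pvDomStr at this
      rw [hl] at this
      simpa using this
    rw [hletter]
    exact pv_single c hc
  | [] =>
    have h : letter.toList.length ≠ 1 := by rw [hl]; simp
    show getReverseletter letter = getReverseletter_alt letter
    unfold getReverseletter getReverseletter_alt
    rw [pvLoopA_of_len_ne_one letter h, hl]
  | c :: d :: rest =>
    have h : letter.toList.length ≠ 1 := by rw [hl]; simp
    show getReverseletter letter = getReverseletter_alt letter
    unfold getReverseletter getReverseletter_alt
    rw [pvLoopA_of_len_ne_one letter h, hl]
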